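-- pv_equiv track=rewrite | github.com/Chiragj2003/leet-code-python- | String/833_FindReplace.py | findReplaceString_mark
-- ===== SOURCE A (Python) =====
-- def findReplaceString_mark(s, indices, sources, targets):
--     """
--     Mark valid replacements, then build result
--     Time: O(n + m), Space: O(m)
--
--     Two-pass approach.
--     """
--     # Mark replacements
--     replace_map = {}
--     for i, idx in enumerate(indices):
--         if s[idx:idx+len(sources[i])] == sources[i]:
--             replace_map[idx] = (len(sources[i]), targets[i])
--
--     # Build result
--     result = []
--     i = 0
--     while i < len(s):
--         if i in replace_map:
--             skip_len, target = replace_map[i]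
--             result.append(target)
--             i += skip_len
--         else:
--             result.append(s[i])
--             i += 1
--
--     return ''.join(result)
-- ===== SOURCE B (Python) =====
-- def findReplaceString_mark(s, indices, sources, targets):
--     # Same validity dict as the spec requires (last write wins on duplicate indices),
--     # then sort by index and copy whole segments instead of scanning char by char.
--     replace = {}
--     for i, idx in enumerate(indices):
--         if s[idx:idx+len(sources[i])] == sources[i]:
--             replace[idx] = (len(sources[i]), targets[i])
--     pos, parts = 0, []
--     for idx, (skip, target) in sorted(replace.items(), key=lambda kv: kv[0]):
--         if idx >= pos:
--             parts.append(s[pos:idx])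
--             parts.append(target)
--             pos = idx + skip
--     parts.append(s[pos:])
--     return ''.join(parts)
-- ===== Notes on version B (the rewrite author's own statement) =====
-- stated objective: alternative
-- what changed: The char-by-char while loop with a per-position dict membership test is replaced by sorting the validity dict's items by index and emitting whole string segments (s[pos:idx] + target) with a cursor, skipping overlapped entries via the idx>=pos guard.
-- outside the precondition, e.g. on findReplaceString_mark('ab', [0], ['b'], []): A returns 'ab', B returns 'ab'; on findReplaceString_mark('ab', [5], [''], ['X']): A returns 'ab', B returns 'abX'
import Mathlib
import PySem

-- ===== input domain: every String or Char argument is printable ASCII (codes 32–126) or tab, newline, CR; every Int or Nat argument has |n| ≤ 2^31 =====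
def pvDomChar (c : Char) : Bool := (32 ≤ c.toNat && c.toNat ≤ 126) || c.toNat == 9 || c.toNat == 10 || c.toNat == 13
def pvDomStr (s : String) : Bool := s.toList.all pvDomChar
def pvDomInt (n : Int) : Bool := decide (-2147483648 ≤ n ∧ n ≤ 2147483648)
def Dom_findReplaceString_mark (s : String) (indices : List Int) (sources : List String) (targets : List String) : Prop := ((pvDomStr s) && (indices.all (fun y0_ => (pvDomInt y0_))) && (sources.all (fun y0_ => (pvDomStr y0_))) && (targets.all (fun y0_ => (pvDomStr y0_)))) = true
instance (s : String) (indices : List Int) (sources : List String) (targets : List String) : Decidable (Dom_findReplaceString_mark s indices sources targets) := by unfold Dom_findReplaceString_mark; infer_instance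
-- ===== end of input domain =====

-- B replaces A's char-by-char scan (dict membership test at every position) by sorting the
-- validity dict's items by index and emitting whole segments with a cursor: an alternative
-- decomposition of the same exact computation (no speed claim).


-- ===== PORT A =====
-- the first pass of both Pythons is the same code line for line: the dict of valid replacements
-- (idx -> (len(sources[i]), targets[i])), last write winning on duplicate indices
def pvMark (s : String) (indices : List Int) (sources : List String) (targets : List String) :
    PySem.Dict Int (Int × String) :=
  (PySem.List.enumerate indices).foldl
    (fun d p =>
      if PySem.Str.slice s (some p.2) (some (p.2 + PySem.Str.len (PySem.List.pyGetD sources p.1 ""))) =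
          PySem.List.pyGetD sources p.1 "" then
        d.insert p.2 (PySem.Str.len (PySem.List.pyGetD sources p.1 ""), PySem.List.pyGetD targets p.1 "")
      else d)
    PySem.Dict.empty

-- A's while loop; fuel = len(s): under Pre_ every marked entry has skip ≥ 1, so the loop runs
-- at most len(s) iterations; i stays in [0, len(s)), so the pyGetD default is never read
def pvLoopA (cs : List Char) (d : PySem.Dict Int (Int × String)) :
    Nat → Int → List String → List String
  | 0, _, acc => acc
  | fuel + 1, i, acc =>
    if i < (cs.length : Int) then
      match d.get? i with
      | some v => pvLoopA cs d fuel (i + v.1) (acc ++ [v.2])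
      | none => pvLoopA cs d fuel (i + 1) (acc ++ [String.ofList [PySem.List.pyGetD cs i ' ']])
    else acc

def findReplaceString_mark (s : String) (indices : List Int) (sources : List String) (targets : List String) : String :=
  PySem.Str.join "" (pvLoopA s.toList (pvMark s indices sources targets) s.toList.length 0 [])

-- ===== PORT B =====
-- B's cursor step: skip entries overlapped by an earlier replacement (idx < pos), otherwise
-- emit the untouched segment s[pos:idx] and the target, and move the cursor past the source
def pvStep (s : String) (st : Int × List String) (kv : Int × (Int × String)) : Int × List String :=
  if st.1 ≤ kv.1 then
    (kv.1 + kv.2.1, st.2 ++ [PySem.Str.slice s (some st.1) (some kv.1), kv.2.2])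
  else st

def findReplaceString_mark_alt (s : String) (indices : List Int) (sources : List String) (targets : List String) : String :=
  let r := (PySem.List.sorted (pvMark s indices sources targets).items (fun kv => kv.1) false).foldl
    (pvStep s) (0, [])
  PySem.Str.join "" (r.2 ++ [PySem.Str.slice s (some r.1) none])

-- ===== PRECONDITION & SPEC =====
-- Pre_ excludes inputs whose sources/targets lists are shorter than indices (A raises
-- IndexError when such an entry is reached) and inputs with an empty source at a nonnegative
-- used index (an empty source always "matches"; A loops forever when it is marked at a
-- reachable position, and where it is marked at/past the end A's silently ignoring it is
-- accidental).
def Pre_findReplaceString_mark (s : String) (indices : List Int) (sources : List String) (targets : List String) : Prop :=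
  indices.length ≤ sources.length ∧ indices.length ≤ targets.length ∧
    ∀ k, k < indices.length → sources.getD k "" ≠ "" ∨ indices.getD k 0 < 0
instance (s : String) (indices : List Int) (sources : List String) (targets : List String) : Decidable (Pre_findReplaceString_mark s indices sources targets) := by
  unfold Pre_findReplaceString_mark; infer_instance

def pvWitness_findReplaceString_mark : String × List Int × List String × List String :=
  ("abcd", [0, 2], ["ab", "cd"], ["X", "Y"])

def Spec_findReplaceString_mark (s : String) (indices : List Int) (sources : List String) (targets : List String) (out : String) : Prop := out = findReplaceString_mark_alt s indices sources targets
instance (s : String) (indices : List Int) (sources : List String) (targets : List String) (out : String) : Decidable (Spec_findReplaceString_mark s indices sources targets out) := by unfold Spec_findReplaceString_mark; infer_instance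

-- ===== CLAIM (what is proved, stated in full; the proofs are below) =====
def Claim_equal_findReplaceString_mark : Prop := ∀ (s : String) (indices : List Int) (sources : List String) (targets : List String), Dom_findReplaceString_mark s indices sources targets → Pre_findReplaceString_mark s indices sources targets → Spec_findReplaceString_mark s indices sources targets (findReplaceString_mark s indices sources targets)

-- ===== LEMMAS AND PROOFS =====

-- ''.join at the List Char level
theorem pv_intercalate_nil : ∀ (L : List (List Char)),
    (List.intersperse ([] : List Char) L).flatten = L.flatten
  | [] => rfl
  | [a] => rfl
  | a :: b :: t => by
      simp only [List.intersperse_cons₂, List.flatten_cons, pv_intercalate_nil (b :: t)]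
      simp

theorem pv_join_empty (l : List String) :
    (PySem.Str.join "" l).toList = (l.map String.toList).flatten := by
  rw [PySem.Str.toList_join]
  simp [PySem.Chars.join, List.intercalate, pv_intercalate_nil]

-- the loop accumulator appends
theorem pv_loopA_acc (cs : List Char) (d : PySem.Dict Int (Int × String)) :
    ∀ (fuel : Nat) (i : Int) (acc : List String),
      pvLoopA cs d fuel i acc = acc ++ pvLoopA cs d fuel i [] := by
  intro fuel
  induction fuel with
  | zero => intro i acc; simp [pvLoopA]
  | succ f ih =>
      intro i acc
      by_cases h : i < (cs.length : Int)
      · simp only [pvLoopA, if_pos h]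
        cases hg : d.get? i with
        | some v =>
            dsimp only
            rw [ih (i + v.1) (acc ++ [v.2]), ih (i + v.1) ([] ++ [v.2])]
            simp
        | none =>
            dsimp only
            rw [ih (i + 1) (acc ++ _), ih (i + 1) ([] ++ _)]
            simp
      · simp [pvLoopA, h]

-- past the end the loop stops, whatever the fuel
theorem pv_loopA_stop (cs : List Char) (d : PySem.Dict Int (Int × String))
    (fuel : Nat) (i : Int) (acc : List String) (h : (cs.length : Int) ≤ i) :
    pvLoopA cs d fuel i acc = acc := by
  cases fuel with
  | zero => rfl
  | succ f => simp [pvLoopA, not_lt.mpr h]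

-- B's fold accumulator appends
theorem pv_foldB_acc (s : String) :
    ∀ (L : List (Int × (Int × String))) (pos : Int) (parts : List String),
      L.foldl (pvStep s) (pos, parts) =
        ((L.foldl (pvStep s) (pos, [])).1, parts ++ (L.foldl (pvStep s) (pos, [])).2) := by
  intro L
  induction L with
  | nil => intro pos parts; simp
  | cons kv L ih =>
      intro pos parts
      simp only [List.foldl_cons, pvStep]
      by_cases h : pos ≤ kv.1
      · rw [if_pos h, if_pos h]
        rw [ih (kv.1 + kv.2.1) (parts ++ _), ih (kv.1 + kv.2.1) ([] ++ _)]
        simp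
      · rw [if_neg h, if_neg h]
        exact ih pos parts

-- a predicate preserved by every step of a dict-building fold holds of the result
theorem pv_foldl_pred {β : Type} (P : PySem.Dict Int (Int × String) → Prop)
    (F : PySem.Dict Int (Int × String) → β → PySem.Dict Int (Int × String)) :
    ∀ (l : List β) (d : PySem.Dict Int (Int × String)), P d →
      (∀ d' b, b ∈ l → P d' → P (F d' b)) → P (l.foldl F d) := by
  intro l
  induction l with
  | nil => intro d hd _; exact hd
  | cons b l ih =>
      intro d hd hstep
      exact ih (F d b) (hstep d b (by simp) hd) fun d' b' hb' => hstep d' b' (by simp [hb'])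

theorem pv_clampIdx_nonneg (n : Nat) (i : Int) (h : 0 ≤ i) :
    PySem.List.clampIdx n i = min i.toNat n := by
  unfold PySem.List.clampIdx
  rw [if_neg (not_lt.mpr h)]

-- the marked dict has distinct keys
theorem pv_mark_nodup (s : String) (indices : List Int) (sources targets : List String) :
    (pvMark s indices sources targets).keys.Nodup := by
  unfold pvMark
  apply pv_foldl_pred (P := fun d => d.keys.Nodup)
  · exact List.nodup_nil
  · intro d' b _ hP
    dsimp only
    split
    · exact PySem.Dict.nodup_keys_insert d' _ _ hP
    · exact hP

-- under Pre_, every marked entry at a nonnegative index has skip ≥ 1 and fits inside s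
theorem pv_mark_fact (s : String) (indices : List Int) (sources targets : List String)
    (hs : indices.length ≤ sources.length)
    (hne : ∀ k, k < indices.length → sources.getD k "" ≠ "" ∨ indices.getD k 0 < 0) :
    ∀ p ∈ (pvMark s indices sources targets).items, 0 ≤ p.1 →
      1 ≤ p.2.1 ∧ p.1 + p.2.1 ≤ (s.toList.length : Int) := by
  unfold pvMark
  apply pv_foldl_pred
    (P := fun d => ∀ p ∈ d.items, 0 ≤ p.1 → 1 ≤ p.2.1 ∧ p.1 + p.2.1 ≤ (s.toList.length : Int))
  · intro p hp; simp [PySem.Dict.empty] at hp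
  · intro d' b hb hP
    dsimp only
    split
    · rename_i hmatch
      intro p hp hpos
      rw [PySem.Dict.mem_items_insert] at hp
      rcases hp with hp | hp
      · -- the freshly inserted pair
        subst hp
        dsimp only at hpos ⊢
        obtain ⟨k, hk, hbeq⟩ := (PySem.List.mem_enumerate_iff indices 0 b).mp hb
        have hb1 : b.1 = (k : Int) := by rw [hbeq]; simp
        have hb2 : b.2 = indices[k] := by rw [hbeq]
        have hsrc : PySem.List.pyGetD sources b.1 "" = sources[k]'(by omega) := by
          rw [hb1, PySem.List.pyGetD_natCast]
          exact List.getD_eq_getElem sources "" (by omega)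
        set src := PySem.List.pyGetD sources b.1 "" with hsrcdef
        have hne' : src ≠ "" := by
          rcases hne k hk with h | h
          · rwa [hsrc, ← List.getD_eq_getElem sources "" (by omega)]
          · rw [List.getD_eq_getElem indices 0 hk] at h
            omega
        have hlen : 1 ≤ src.toList.length := by
          have : src.toList ≠ [] := fun hnil => hne' (String.toList_eq_nil_iff.mp hnil)
          exact List.length_pos_of_ne_nil this
        have hsl := congrArg String.toList hmatch
        rw [PySem.Str.toList_slice, PySem.Chars.slice_eq_listSlice] at hsl
        have hlslice := congrArg List.length hsl
        rw [PySem.List.length_slice] at hlslice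
        have hLnn : (0 : Int) ≤ PySem.Str.len src := by
          rw [PySem.Str.len_eq]; positivity
        have hc1 : PySem.List.clampIdx s.toList.length b.2 = min b.2.toNat s.toList.length :=
          pv_clampIdx_nonneg _ _ hpos
        have hc2 : PySem.List.clampIdx s.toList.length (b.2 + PySem.Str.len src) =
            min (b.2 + PySem.Str.len src).toNat s.toList.length :=
          pv_clampIdx_nonneg _ _ (by omega)
        rw [hc2, hc1, PySem.Str.len_eq] at hlslice
        rw [PySem.Str.len_eq]
        constructor
        · omega
        · omega
      · exact hP p hp.1 hpos
    · exact hP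

-- a stretch of positions with no marked entry is copied verbatim
theorem pv_scan (s : String) (d : PySem.Dict Int (Int × String)) :
    ∀ (m : Nat) (pos : Int) (fuel : Nat), 0 ≤ pos →
      pos.toNat + m ≤ s.toList.length → m ≤ fuel →
      (∀ j : Int, pos ≤ j → j < pos + m → d.get? j = none) →
      ((pvLoopA s.toList d fuel pos []).map String.toList).flatten =
        (s.toList.drop pos.toNat).take m ++
          ((pvLoopA s.toList d (fuel - m) (pos + m) []).map String.toList).flatten := by
  intro m
  induction m with
  | zero => intro pos fuel _ _ _ _; simp
  | succ m ih =>
      intro pos fuel h0 hlen hfuel hnone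
      have hposn : pos < (s.toList.length : Int) := by omega
      cases fuel with
      | zero => omega
      | succ f =>
          have hg : d.get? pos = none := hnone pos le_rfl (by omega)
          simp only [pvLoopA, if_pos hposn, hg]
          rw [pv_loopA_acc]
          have hnone' : ∀ j : Int, pos + 1 ≤ j → j < (pos + 1) + (m : Int) → d.get? j = none := by
            intro j h1 h2
            exact hnone j (by omega) (by push_cast; omega)
          have hrec := ih (pos + 1) f (by omega) (by omega) (by omega) hnone'
          have e1 : pos + 1 + (m : Int) = pos + ((m + 1 : Nat) : Int) := by push_cast; ring
          have e2 : f - m = (f + 1) - (m + 1) := by omega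
          rw [e1, e2] at hrec
          have hchar : PySem.List.pyGetD s.toList pos ' ' = s.toList[pos.toNat]'(by omega) :=
            PySem.List.pyGetD_eq_getElem _ _ h0 hposn
          have e3 : (pos + 1).toNat = pos.toNat + 1 := by omega
          rw [e3] at hrec
          rw [List.drop_eq_getElem_cons (by omega : pos.toNat < s.toList.length),
            List.take_succ_cons]
          simp only [List.map_append, List.flatten_append, hrec, List.nil_append,
            List.map_cons, List.map_nil, List.flatten_cons, hchar, String.toList_ofList]
          simp

-- main invariant: from cursor pos, A's scan and B's remaining segment fold agree
theorem pv_main (s : String) (d : PySem.Dict Int (Int × String))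
    (hN : d.keys.Nodup)
    (hG : ∀ p ∈ d.items, 0 ≤ p.1 → 1 ≤ p.2.1 ∧ p.1 + p.2.1 ≤ (s.toList.length : Int)) :
    ∀ (L : List (Int × (Int × String))) (pos : Int) (fuel : Nat),
      0 ≤ pos → s.toList.length ≤ fuel + pos.toNat →
      L.Pairwise (fun a b => a.1 < b.1) →
      (∀ p ∈ L, p ∈ d.items) →
      (∀ p ∈ d.items, pos ≤ p.1 → p ∈ L) →
      ((pvLoopA s.toList d fuel pos []).map String.toList).flatten =
        (((L.foldl (pvStep s) (pos, [])).2).map String.toList).flatten ++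
          (PySem.Str.slice s (some (L.foldl (pvStep s) (pos, [])).1) none).toList := by
  intro L
  induction L with
  | nil =>
      intro pos fuel h0 hfuel _ _ hcomp
      simp only [List.foldl_nil, List.map_nil, List.flatten_nil, List.nil_append]
      have hslice : (PySem.Str.slice s (some pos) none).toList = s.toList.drop pos.toNat := by
        rw [PySem.Str.toList_slice, PySem.Chars.slice_eq_listSlice, PySem.List.slice_from _ h0]
      have hnone : ∀ j : Int, pos ≤ j →
          j < pos + ((s.toList.length - pos.toNat : Nat) : Int) → d.get? j = none := by
        intro j h1 _
        cases hg : d.get? j with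
        | none => rfl
        | some v =>
            have hm := PySem.Dict.mem_items_of_get?_eq_some d hg
            exact absurd (hcomp (j, v) hm h1) (by simp)
      by_cases hcase : pos.toNat < s.toList.length
      · have hsc := pv_scan s d (s.toList.length - pos.toNat) pos fuel h0 (by omega)
          (by omega) hnone
        rw [hsc, pv_loopA_stop _ _ _ _ _
          (by omega : (s.toList.length : Int) ≤ pos + ((s.toList.length - pos.toNat : Nat) : Int))]
        simp only [List.map_nil, List.flatten_nil, List.append_nil, hslice]
        exact List.take_of_length_le (by simp)
      · rw [pv_loopA_stop _ _ _ _ _ (by omega)]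
        rw [hslice, List.drop_eq_nil_of_le (by omega)]
        rfl
  | cons kv L ih =>
      intro pos fuel h0 hfuel hpair hsub hcomp
      by_cases hguard : pos ≤ kv.1
      · have hkv : kv ∈ d.items := hsub kv (by simp)
        obtain ⟨hskip, hfit⟩ := hG kv hkv (le_trans h0 hguard)
        have hkvn : kv.1 < (s.toList.length : Int) := by omega
        have hm : pos + (((kv.1 - pos).toNat : Nat) : Int) = kv.1 := by omega
        have hnone : ∀ j : Int, pos ≤ j → j < pos + (((kv.1 - pos).toNat : Nat) : Int) →
            d.get? j = none := by
          intro j h1 h2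
          cases hg' : d.get? j with
          | none => rfl
          | some v =>
              have hmI := PySem.Dict.mem_items_of_get?_eq_some d hg'
              rcases List.mem_cons.mp (hcomp (j, v) hmI h1) with he | hL
              · have : j = kv.1 := congrArg Prod.fst he
                omega
              · have := (List.pairwise_cons.mp hpair).1 (j, v) hL
                dsimp at this; omega
        have hsc := pv_scan s d (kv.1 - pos).toNat pos fuel h0 (by omega) (by omega) hnone
        rw [hm] at hsc
        have hget : d.get? kv.1 = some kv.2 := PySem.Dict.get?_of_mem_items d hkv hN
        obtain ⟨f, hf⟩ : ∃ f, fuel - (kv.1 - pos).toNat = f + 1 :=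
          ⟨fuel - (kv.1 - pos).toNat - 1, by omega⟩
        rw [hsc, hf]
        simp only [pvLoopA, if_pos hkvn, hget]
        rw [pv_loopA_acc]
        have hrec := ih (kv.1 + kv.2.1) f (by omega) (by omega)
          (List.pairwise_cons.mp hpair).2
          (fun p hp => hsub p (by simp [hp]))
          (fun p hp hge => by
            rcases List.mem_cons.mp (hcomp p hp (by omega)) with he | hL
            · exfalso
              have hpe : p.1 = kv.1 := by rw [he]
              omega
            · exact hL)
        simp only [List.foldl_cons, pvStep, if_pos hguard]
        rw [pv_foldB_acc s L (kv.1 + kv.2.1)]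
        have hsl2 : (PySem.Str.slice s (some pos) (some kv.1)).toList =
            (s.toList.drop pos.toNat).take (kv.1 - pos).toNat := by
          rw [PySem.Str.toList_slice, PySem.Chars.slice_eq_listSlice,
            PySem.List.slice_toNat _ h0 (by omega)]
          congr 1
          omega
        simp only [List.map_append, List.flatten_append, List.map_cons, List.map_nil,
          List.flatten_cons, List.flatten_nil, List.nil_append, List.append_nil, hrec, hsl2]
        simp [List.append_assoc]
      · simp only [List.foldl_cons, pvStep, if_neg hguard]
        exact ih pos fuel h0 hfuel (List.pairwise_cons.mp hpair).2
          (fun p hp => hsub p (by simp [hp]))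
          (fun p hp hge => by
            rcases List.mem_cons.mp (hcomp p hp hge) with he | hL
            · exfalso
              have hpe : p.1 = kv.1 := by rw [he]
              omega
            · exact hL)

-- ===== VERDICT (by name: the statement is the Claim_ definition above) =====
theorem findReplaceString_mark_spec : Claim_equal_findReplaceString_mark := by
  intro s indices sources targets _ hPre
  obtain ⟨hs, _, hne⟩ := hPre
  unfold Spec_findReplaceString_mark findReplaceString_mark findReplaceString_mark_alt
  dsimp only
  set d := pvMark s indices sources targets with hd
  have hN := pv_mark_nodup s indices sources targets
  have hG := pv_mark_fact s indices sources targets hs hne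
  rw [← hd] at hN hG
  set L := PySem.List.sorted d.items (fun kv => kv.1) false with hL
  have hperm := PySem.List.sorted_perm d.items (fun kv : Int × (Int × String) => kv.1) false
  rw [← hL] at hperm
  have hNk : (d.items.map (fun kv => kv.1)).Nodup := hN
  have hND : (L.map (fun kv => kv.1)).Nodup :=
    ((hperm.map (fun kv => kv.1)).nodup_iff).mpr hNk
  have hpairle := PySem.List.sorted_pairwise d.items (fun kv : Int × (Int × String) => kv.1)
  rw [← hL] at hpairle
  have hpairne : L.Pairwise (fun a b => a.1 ≠ b.1) := List.pairwise_map.mp hND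
  have hpair : L.Pairwise (fun a b => a.1 < b.1) :=
    (hpairle.and hpairne).imp fun h => lt_of_le_of_ne h.1 h.2
  have hmain := pv_main s d hN hG L 0 s.toList.length (le_refl 0) (by simp) hpair
    (fun p hp => (PySem.List.mem_sorted d.items (fun kv => kv.1) false p).mp (hL ▸ hp))
    (fun p hp _ => hL ▸ (PySem.List.mem_sorted d.items (fun kv => kv.1) false p).mpr hp)
  apply String.toList_inj.mp
  rw [pv_join_empty, pv_join_empty]
  simp only [List.map_append, List.flatten_append, List.map_cons, List.map_nil,
    List.flatten_cons, List.flatten_nil, List.append_nil]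
  exact hmain
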